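-- pv_equiv track=rewrite | github.com/rouggerxavier/DocOps_Agent | docops/db/crud.py | _normalize_source_doc_ids
-- ===== SOURCE A (Python) =====
-- def _normalize_source_doc_ids(source_doc_ids: list[str] | None) -> str | None:
--     if not source_doc_ids:
--         return None
--     normalized: list[str] = []
--     seen: set[str] = set()
--     for raw in source_doc_ids:
--         value = str(raw or "").strip()
--         if not value or value in seen:
--             continue
--         seen.add(value)
--         normalized.append(value)
--     if not normalized:
--         return None
--     # Pipe-delimited with leading/trailing marker allows exact-ish LIKE match.
--     return f"|{'|'.join(normalized)}|"
-- ===== SOURCE B (Python) =====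
-- def _normalize_source_doc_ids(source_doc_ids):
--     if not source_doc_ids:
--         return None
--
--     def sieve(values):
--         # dedup by sieving: keep the head, drop its later duplicates, recurse
--         if not values:
--             return []
--         head = values[0]
--         return [head] + sieve([v for v in values[1:] if v != head])
--
--     cleaned = [v for raw in source_doc_ids if (v := str(raw or "").strip())]
--     deduped = sieve(cleaned)
--     if not deduped:
--         return None
--     return "|" + "|".join(deduped) + "|"
-- ===== Notes on version B (the rewrite author's own statement) =====
-- stated objective: alternative
-- what changed: Replaces the single-pass loop with a parallel seen-set by a filter pass followed by a recursive sieve dedup that keeps each head and deletes its later duplicates from the remainder (no seen structure at all).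
import Mathlib
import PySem

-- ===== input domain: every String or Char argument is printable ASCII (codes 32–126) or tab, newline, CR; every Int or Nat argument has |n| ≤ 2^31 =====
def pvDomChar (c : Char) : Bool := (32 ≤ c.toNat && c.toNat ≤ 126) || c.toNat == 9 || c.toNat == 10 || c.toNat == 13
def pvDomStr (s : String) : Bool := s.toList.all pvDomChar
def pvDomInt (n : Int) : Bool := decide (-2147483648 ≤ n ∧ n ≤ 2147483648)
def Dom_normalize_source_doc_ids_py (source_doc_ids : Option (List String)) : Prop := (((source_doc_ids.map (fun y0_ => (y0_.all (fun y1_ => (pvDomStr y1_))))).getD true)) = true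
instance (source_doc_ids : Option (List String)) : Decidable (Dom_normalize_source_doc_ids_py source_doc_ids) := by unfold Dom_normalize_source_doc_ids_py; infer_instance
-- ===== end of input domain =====

-- ===== PORT A =====
-- A: one pass with a parallel seen-set; B: filter pass, then a recursive sieve dedup with no seen structure (objective: alternative)
-- shared helper: value = str(raw or "").strip()  (identical expression in both Python sources)
def pvClean (raw : String) : String := PySem.Str.strip (if raw = "" then "" else raw)

-- A's loop body: skip empty/seen values, else append and record in seen
def pvStepA (st : List String × PySem.Set String) (raw : String) : List String × PySem.Set String :=
  let value := pvClean raw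
  if value = "" ∨ PySem.Set.contains st.2 value then st
  else (st.1 ++ [value], PySem.Set.add st.2 value)

def normalize_source_doc_ids_py (source_doc_ids : Option (List String)) : Option String :=
  match source_doc_ids with
  | none => none
  | some ids =>
    if ids = [] then none
    else
      let st := ids.foldl pvStepA ([], PySem.Set.empty)
      if st.1 = [] then none
      else some (PySem.Str.join "" ["|", PySem.Str.join "|" st.1, "|"])

-- ===== PORT B =====
-- sieve: keep the head, delete its later duplicates from the remainder, recurse
def pvSieve (xs : List String) : List String :=
  match xs with
  | [] => []
  | h :: t => h :: pvSieve (t.filter (· != h))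
termination_by xs.length
decreasing_by
  calc (List.filter _ t.attach).unattach.length ≤ t.attach.unattach.length := by
        simp only [List.unattach_filter, List.length_filter_le, List.unattach_attach]
    _ < (h :: t).length := by simp

def normalize_source_doc_ids_py_alt (source_doc_ids : Option (List String)) : Option String :=
  match source_doc_ids with
  | none => none
  | some ids =>
    if ids = [] then none
    else
      let cleaned := (ids.map pvClean).filter (· != "")
      let deduped := pvSieve cleaned
      if deduped = [] then none
      else some (PySem.Str.join "" ["|", PySem.Str.join "|" deduped, "|"])

-- ===== PRECONDITION & SPEC =====
def Spec_normalize_source_doc_ids_py (source_doc_ids : Option (List String)) (out : Option String) : Prop := out = normalize_source_doc_ids_py_alt source_doc_ids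
instance (source_doc_ids : Option (List String)) (out : Option String) : Decidable (Spec_normalize_source_doc_ids_py source_doc_ids out) := by unfold Spec_normalize_source_doc_ids_py; infer_instance

-- ===== CLAIM =====
def Claim_equal_normalize_source_doc_ids_py : Prop := ∀ (source_doc_ids : Option (List String)), Dom_normalize_source_doc_ids_py source_doc_ids → Spec_normalize_source_doc_ids_py source_doc_ids (normalize_source_doc_ids_py source_doc_ids)

-- ===== LEMMAS AND PROOFS =====

-- A's loop, started with seen = the accumulated list viewed as a set, folds Set.add over the cleaned non-empty values.
lemma loopA_eq_foldl_add (raws : List String) (acc : List String) :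
    (raws.foldl pvStepA (acc, acc)).1 =
    ((raws.map pvClean).filter (· != "")).foldl PySem.Set.add acc := by
  induction raws generalizing acc with
  | nil => rfl
  | cons r rs ih =>
    rw [List.foldl_cons, List.map_cons, List.filter_cons]
    by_cases hv : pvClean r = ""
    · have hstep : pvStepA (acc, acc) r = (acc, acc) := by simp [pvStepA, hv]
      rw [hstep, ih, hv]
      simp
    · by_cases hc : pvClean r ∈ acc
      · have hstep : pvStepA (acc, acc) r = (acc, acc) := by
          simp [pvStepA, hv, hc]
        rw [hstep, ih]
        simp [PySem.Set.add, hv, hc]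
      · have hstep : pvStepA (acc, acc) r
            = (acc ++ [pvClean r], acc ++ [pvClean r]) := by
          simp [pvStepA, hv, PySem.Set.add, hc]
        rw [hstep, ih]
        simp [PySem.Set.add, hv, hc]

-- folding Set.add over xs appends exactly the sieve of the values not already in the accumulator
lemma foldl_add_eq_sieve (xs : List String) (acc : List String) :
    xs.foldl PySem.Set.add acc = acc ++ pvSieve (xs.filter (fun x => !(acc.contains x))) := by
  induction xs generalizing acc with
  | nil => rw [List.foldl_nil, List.filter_nil, pvSieve, List.append_nil]
  | cons x t ih =>
    rw [List.foldl_cons, List.filter_cons]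
    by_cases hx : x ∈ acc
    · have hcx : acc.contains x = true := by simpa [List.contains_eq_mem] using hx
      have : PySem.Set.add acc x = acc := by simp [PySem.Set.add, List.contains_eq_mem, hx]
      rw [this, ih, hcx]
      simp
    · have hcx : acc.contains x = false := by simpa [List.contains_eq_mem] using hx
      have : PySem.Set.add acc x = acc ++ [x] := by simp [PySem.Set.add, List.contains_eq_mem, hx]
      rw [this, ih, hcx]
      simp only [Bool.not_false, if_pos, List.append_assoc, List.singleton_append]
      rw [pvSieve, List.filter_filter]
      congr 2
      apply congrArg pvSieve
      apply List.filter_congr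
      intro y _
      by_cases hy : y = x
      · simp [hy]
      · simp [hy, List.contains_eq_mem, List.mem_append]

-- ===== VERDICT =====
theorem normalize_source_doc_ids_py_spec : Claim_equal_normalize_source_doc_ids_py := by
  intro ids _
  unfold Spec_normalize_source_doc_ids_py normalize_source_doc_ids_py normalize_source_doc_ids_py_alt
  cases ids with
  | none => rfl
  | some l =>
    by_cases hl : l = []
    · simp [hl]
    · simp only [hl, if_false]
      have h := loopA_eq_foldl_add l []
      rw [foldl_add_eq_sieve] at h
      simp only [List.contains_nil, Bool.not_false, List.filter_true, List.nil_append] at h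
      rw [show (([] : List String), PySem.Set.empty) = (([] : List String), ([] : List String)) from rfl, h]
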